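-- pv_equiv track=rewrite | github.com/anemele/py-pdf | src/py_pdf/_com/__init__.py | sort_to_booklet
-- ===== SOURCE A (Python) =====
-- from typing import Optional, Sequence, TypeVar
--
-- T = TypeVar("T")
--
-- def sort_to_booklet(pages: Sequence[T]) -> Sequence[T]:
--     """将PDF页面从自然顺序转换为小册子顺序。
--     页面数目必须是 4 的倍数。
--     1, 2, 3, 4, 5, 6, 7, 8
--     ->
--     8, 1, 2, 7, 6, 3, 4, 5
--     """
--     if len(pages) % 4 != 0:
--         raise ValueError("页面数目必须是 4 的倍数")
--
--     res = list[T]()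
--     left = 0
--     right = len(pages) - 1
--     for i in range(len(pages) // 2):
--         if i % 2 == 0:
--             res.append(pages[right])
--             res.append(pages[left])
--         else:
--             res.append(pages[left])
--             res.append(pages[right])
--         left += 1
--         right -= 1
--
--     return res
-- ===== SOURCE B (Python) =====
-- def sort_to_booklet(pages):
--     """Booklet order by recursion: peel the outermost sheet
--     (last, first, second, second-to-last) and recurse on the middle."""
--     if len(pages) % 4 != 0:
--         raise ValueError("页面数目必须是 4 的倍数")
--     if not pages:
--         return []
--     return [pages[-1], pages[0], pages[1], pages[-2]] + sort_to_booklet(pages[2:-2])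
-- ===== Notes on version B (the rewrite author's own statement) =====
-- stated objective: alternative
-- what changed: Replaces A's iterative two-pointer loop with a parity branch by a recursive peeling: each step emits the outermost sheet [last, first, second, second-to-last] and recurses on the middle slice pages[2:-2].
import Mathlib
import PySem

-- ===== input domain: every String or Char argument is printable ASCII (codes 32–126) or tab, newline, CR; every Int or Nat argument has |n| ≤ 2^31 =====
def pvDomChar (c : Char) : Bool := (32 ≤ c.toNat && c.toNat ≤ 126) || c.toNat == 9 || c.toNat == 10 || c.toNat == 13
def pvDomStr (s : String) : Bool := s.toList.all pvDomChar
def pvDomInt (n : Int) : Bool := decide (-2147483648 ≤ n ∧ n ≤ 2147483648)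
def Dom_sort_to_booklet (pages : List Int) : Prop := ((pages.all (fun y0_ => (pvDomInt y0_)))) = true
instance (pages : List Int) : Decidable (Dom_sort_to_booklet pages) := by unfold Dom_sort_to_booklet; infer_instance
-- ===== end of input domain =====

-- B replaces A's iterative two-pointer loop (parity branch, moving left/right)
-- by a recursion that peels the outermost sheet [last, first, second,
-- second-to-last] and recurses on the middle slice pages[2:-2].
-- Return values proved equal on Pre_ (length % 4 = 0).

-- ===== PORT A =====
-- alternating-pointer loop: state (res, left, right), parity branch on i
def sort_to_booklet (pages : List Int) : List Int :=
  if PySem.Int.mod (pages.length : Int) 4 ≠ 0 then []  -- Python raises ValueError here (outside Pre_)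
  else
    (((PySem.List.pyRange 0 (PySem.Int.floordiv (pages.length : Int) 2) 1).foldl
      (fun st i =>
        let res := st.1; let left := st.2.1; let right := st.2.2
        if PySem.Int.mod i 2 = 0 then
          (res ++ [PySem.List.pyGetD pages right 0, PySem.List.pyGetD pages left 0], left + 1, right - 1)
        else
          (res ++ [PySem.List.pyGetD pages left 0, PySem.List.pyGetD pages right 0], left + 1, right - 1))
      ([], 0, (pages.length : Int) - 1))).1

-- ===== PORT B =====
-- termination helper for B's recursion: pages[2:-2] is strictly shorter
theorem pv_mid_lt (pages : List Int) (h : pages ≠ []) :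
    (PySem.List.slice pages (some 2) (some (-2))).length < pages.length := by
  have hlen : 0 < pages.length := List.length_pos_iff.mpr h
  rw [PySem.List.length_slice]
  have h2 : PySem.List.clampIdx pages.length (-2) = pages.length - 2 :=
    PySem.List.clampIdx_neg_ofNat _ 2 (by omega)
  have hle := PySem.List.clampIdx_le pages.length 2
  omega

-- recursive peeling: emit the outer sheet, recurse on the middle slice
def sort_to_booklet_alt (pages : List Int) : List Int :=
  if PySem.Int.mod (pages.length : Int) 4 ≠ 0 then []  -- Python raises ValueError here (outside Pre_)
  else if h : pages = [] then []
  else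
    [PySem.List.pyGetD pages (-1) 0, PySem.List.pyGetD pages 0 0,
     PySem.List.pyGetD pages 1 0, PySem.List.pyGetD pages (-2) 0]
    ++ sort_to_booklet_alt (PySem.List.slice pages (some 2) (some (-2)))
termination_by pages.length
decreasing_by exact pv_mid_lt pages h

-- ===== PRECONDITION & SPEC =====
-- A raises ValueError when the page count is not a multiple of 4
def Pre_sort_to_booklet (pages : List Int) : Prop := pages.length % 4 = 0
instance (pages : List Int) : Decidable (Pre_sort_to_booklet pages) := by unfold Pre_sort_to_booklet; infer_instance
def pvWitness_sort_to_booklet : List Int := [1, 2, 3, 4, 5, 6, 7, 8]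

def Spec_sort_to_booklet (pages : List Int) (out : List Int) : Prop := out = sort_to_booklet_alt pages
instance (pages : List Int) (out : List Int) : Decidable (Spec_sort_to_booklet pages out) := by unfold Spec_sort_to_booklet; infer_instance

-- ===== CLAIM (what is proved, stated in full; the proofs are below) =====
def Claim_equal_sort_to_booklet : Prop := ∀ (pages : List Int), Dom_sort_to_booklet pages → Pre_sort_to_booklet pages → Spec_sort_to_booklet pages (sort_to_booklet pages)

-- ===== LEMMAS AND PROOFS =====

-- per-sheet contribution: the four pages of sheet s, read from `pages`
def pvSheet (pages : List Int) (s : Int) : List Int :=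
  [PySem.List.pyGetD pages ((pages.length : Int) - 1 - 2 * s) 0,
   PySem.List.pyGetD pages (2 * s) 0,
   PySem.List.pyGetD pages (2 * s + 1) 0,
   PySem.List.pyGetD pages ((pages.length : Int) - 2 - 2 * s) 0]

-- two pointer-loop iterations (indices 2q, 2q+1) produce exactly sheet q
theorem booklet_key (pages : List Int) (n : Int) (q : Nat) :
    (PySem.List.pyRange 0 (2 * (q : Int)) 1).foldl
      (fun st i =>
        let res := st.1; let left := st.2.1; let right := st.2.2
        if PySem.Int.mod i 2 = 0 then
          (res ++ [PySem.List.pyGetD pages right 0, PySem.List.pyGetD pages left 0], left + 1, right - 1)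
        else
          (res ++ [PySem.List.pyGetD pages left 0, PySem.List.pyGetD pages right 0], left + 1, right - 1))
      (([], 0, n - 1) : List Int × Int × Int)
    = ((PySem.List.pyRange 0 (q : Int) 1).foldl
        (fun res s =>
          res ++ [PySem.List.pyGetD pages (n - 1 - 2 * s) 0,
                  PySem.List.pyGetD pages (2 * s) 0,
                  PySem.List.pyGetD pages (2 * s + 1) 0,
                  PySem.List.pyGetD pages (n - 2 - 2 * s) 0])
        [],
       2 * (q : Int), n - 1 - 2 * (q : Int)) := by
  induction q with
  | zero => simp [PySem.List.pyRange]
  | succ k ih =>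
    have h1 : (2 * ((k : Int) + 1)) = (2 * (k : Int) + 1) + 1 := by ring
    have h2 : PySem.List.pyRange 0 (2 * (k : Int) + 1 + 1) 1
        = PySem.List.pyRange 0 (2 * (k : Int)) 1 ++ [2 * (k : Int)] ++ [2 * (k : Int) + 1] := by
      rw [PySem.List.pyRange_one_succ_right (by omega),
          PySem.List.pyRange_one_succ_right (by omega)]
    have h3 : PySem.List.pyRange 0 ((k : Int) + 1) 1
        = PySem.List.pyRange 0 (k : Int) 1 ++ [(k : Int)] := by
      rw [PySem.List.pyRange_one_succ_right (by omega)]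
    have he : PySem.Int.mod (2 * (k : Int)) 2 = 0 := by
      rw [PySem.Int.mod_eq_emod_of_pos (by omega)]; omega
    have ho : PySem.Int.mod (2 * (k : Int) + 1) 2 = 1 := by
      rw [PySem.Int.mod_eq_emod_of_pos (by omega)]; omega
    push_cast
    rw [h1, h2, h3, List.foldl_append, List.foldl_append, List.foldl_append]
    push_cast at ih
    rw [ih]
    simp only [List.foldl_cons, List.foldl_nil, he, ho, reduceIte]
    norm_num
    rw [show n - 1 - 2 * (k : Int) - 1 = n - 2 - 2 * (k : Int) from by ring]
    ring_nf
    exact ⟨trivial, trivial⟩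

-- the middle slice pages[2:-2] in drop/take form (for length ≥ 4)
theorem pv_mid_eq (pages : List Int) (h : 4 ≤ pages.length) :
    PySem.List.slice pages (some 2) (some (-2)) = (pages.drop 2).take (pages.length - 4) := by
  simp [PySem.List.slice, PySem.List.clampIdx]
  rw [if_neg (by omega), min_eq_left (by omega),
      show ((pages.length : Int) + -2).toNat - 2 = pages.length - 4 from by omega]

-- shifting a sheet by one into the middle list q (q i = pages (i+2))
theorem sheet_shift (pages q : List Int) (m j : Nat) (hlen : pages.length = 4*m+4)
    (hq : q.length = 4*m)
    (hget : ∀ (i : Nat) (hi : i < 4*m), q[i]'(by omega) = pages[i+2]'(by omega))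
    (hj : j < m) :
    pvSheet pages (1 + (j:Int)) = pvSheet q (j:Int) := by
  simp only [pvSheet, hq, hlen]
  rw [PySem.List.pyGetD_eq_getElem _ _ (by omega) (by push_cast [hq]; omega),
      PySem.List.pyGetD_eq_getElem _ _ (by omega) (by omega),
      PySem.List.pyGetD_eq_getElem _ _ (by omega) (by omega),
      PySem.List.pyGetD_eq_getElem _ _ (by push_cast; omega) (by push_cast [hq]; omega),
      PySem.List.pyGetD_eq_getElem _ _ (by omega) (by push_cast [hlen]; omega),
      PySem.List.pyGetD_eq_getElem _ _ (by omega) (by omega),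
      PySem.List.pyGetD_eq_getElem _ _ (by omega) (by omega),
      PySem.List.pyGetD_eq_getElem _ _ (by push_cast; omega) (by push_cast [hlen]; omega)]
  have key : ∀ (i x y : Nat), i < 4*m → x = i + 2 → y = i →
      ∀ (hx : x < pages.length) (hy : y < q.length), pages[x]'hx = q[y]'hy := by
    intro i x y hi hx' hy' hx hy
    subst hx'; subst hy'
    exact (hget _ hi).symm
  simp only [List.cons.injEq]
  exact ⟨key (4*m-1-2*j) _ _ (by omega) (by omega) (by omega) _ _,
         key (2*j) _ _ (by omega) (by omega) (by omega) _ _,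
         key (2*j+1) _ _ (by omega) (by omega) (by omega) _ _,
         key (4*m-2-2*j) _ _ (by omega) (by omega) (by omega) _ _, trivial⟩

-- B equals the sheet-by-sheet flatMap
theorem alt_eq_sheets : ∀ (k : Nat) (pages : List Int), pages.length = 4 * k →
    sort_to_booklet_alt pages = (PySem.List.pyRange 0 (k : Int) 1).flatMap (pvSheet pages) := by
  intro k
  induction k with
  | zero =>
    intro pages h
    have : pages = [] := List.eq_nil_of_length_eq_zero h
    subst this
    simp [sort_to_booklet_alt]
  | succ m ih =>
    intro pages h
    have hne : pages ≠ [] := by intro e; subst e; simp at h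
    have hm : PySem.Int.mod (pages.length : Int) 4 = 0 := by
      rw [PySem.Int.mod_eq_emod_of_pos (by omega)]; omega
    rw [sort_to_booklet_alt]
    simp only [hm, ne_eq, not_true_eq_false, if_false]
    rw [dif_neg hne, pv_mid_eq pages (by omega)]
    have hmidlen : ((pages.drop 2).take (pages.length - 4)).length = 4 * m := by
      simp [h]; omega
    rw [ih _ hmidlen]
    have hcons : PySem.List.pyRange 0 ((m:Int)+1) 1 = 0 :: PySem.List.pyRange 1 ((m:Int)+1) 1 :=
      PySem.List.pyRange_one_cons (by omega)
    push_cast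
    rw [hcons, List.flatMap_cons]
    congr 1
    · -- head: the four negative/small indices are exactly sheet 0
      simp only [pvSheet]
      have e1 : PySem.List.pyGetD pages (-1) 0 = PySem.List.pyGetD pages ((pages.length:Int) - 1 - 2*0) 0 := by
        rw [PySem.List.pyGetD_neg_ofNat pages 1 0 (by omega) (by omega),
            PySem.List.pyGetD_eq_getElem _ _ (by push_cast; omega) (by push_cast; omega)]
        congr 1; omega
      have e2 : PySem.List.pyGetD pages (-2) 0 = PySem.List.pyGetD pages ((pages.length:Int) - 2 - 2*0) 0 := by
        rw [PySem.List.pyGetD_neg_ofNat pages 2 0 (by omega) (by omega),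
            PySem.List.pyGetD_eq_getElem _ _ (by push_cast; omega) (by push_cast; omega)]
        congr 1; omega
      rw [e1, e2]
      norm_num
    · -- tail: sheets 1..m of pages are sheets 0..m-1 of the middle slice
      rw [PySem.List.pyRange_one 1 ((m:Int)+1), PySem.List.pyRange_one 0 (m:Int),
          show (((m:Int)+1) - 1).toNat = m from by omega,
          show ((m:Int) - 0).toNat = m from by omega,
          List.flatMap_map, List.flatMap_map]
      apply List.flatMap_congr
      intro a ha
      rw [List.mem_range] at ha
      have hget : ∀ (i : Nat) (hi : i < 4*m),
          ((pages.drop 2).take (pages.length - 4))[i]'(by omega) = pages[i+2]'(by omega) := by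
        intro i hi
        simp [List.getElem_take, List.getElem_drop, Nat.add_comm]
      have hs := sheet_shift pages _ m a (by omega) hmidlen hget ha
      simpa using hs.symm

-- ===== VERDICT (by name: the statement is the Claim_ definition above) =====
theorem sort_to_booklet_spec : Claim_equal_sort_to_booklet := by
  intro pages _ hpre
  unfold Spec_sort_to_booklet sort_to_booklet
  unfold Pre_sort_to_booklet at hpre
  have hm : PySem.Int.mod (pages.length : Int) 4 = 0 := by
    rw [PySem.Int.mod_eq_emod_of_pos (by omega)]; omega
  simp only [hm, ne_eq, not_true_eq_false, if_false]
  have hd2 : PySem.Int.floordiv (pages.length : Int) 2 = 2 * ((pages.length / 4 : Nat) : Int) := by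
    rw [PySem.Int.floordiv_eq_ediv_of_pos (by omega)]; omega
  rw [hd2, booklet_key pages (pages.length : Int) (pages.length / 4),
      alt_eq_sheets (pages.length / 4) pages (by omega)]
  rw [PySem.List.foldl_append_eq_flatMap]
  simp only [List.nil_append]
  rfl
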